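-- pv_equiv track=rewrite | github.com/emilygong-zhuying/text-summarization-demo | pages/2_🆚_Extractive_vs_Abstractive.py | further_split
-- ===== SOURCE A (Python) =====
-- def clear_leading_white_tab(string):
--     '''
--     Give 1 single string, clean out all the tabs (4 white spaces)
--     '''
--     if len(string) == 0 : return ""
--     if string[:4] == '    ':
--         return clear_leading_white_tab(string[4:])
--     else:
--         return string[:4] + clear_leading_white_tab(string[4:])
--
-- def further_split(ugly_string):
--     '''
--     Given a string with newline \n in them,
--     Returns a list of actual sentences
--     '''
--     lines = ugly_string.split('\n')
--     cleaned = []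
--     for line in lines:
--         cleaned.append(clear_leading_white_tab(line))
--     condensed = []
--     for i in range(len(cleaned)):
--         p = cleaned[i][0] == '(' and cleaned[i][2] == ')'
--         if p or cleaned[i][:3] == '``(':
--             condensed.append(cleaned[i])
--         elif len(condensed) == 0:
--             condensed.append(cleaned[i])
--         else:
--             condensed[-1] += cleaned[i]
--     return condensed
-- ===== SOURCE B (Python) =====
-- def further_split(ugly_string):
--     '''
--     Given a string with newline \n in them,
--     Returns a list of actual sentences
--     '''
--     out = []
--     buf = []
--     for line in ugly_string.split('\n'):
--         # one pass over 4-char aligned chunks; drop all-space chunks, join once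
--         parts = []
--         i = 0
--         n = len(line)
--         while i < n:
--             if line[i:i+4] != '    ':
--                 parts.append(line[i:i+4])
--             i += 4
--         c = ''.join(parts)
--         if (c[0] == '(' and c[2] == ')') or c[:3] == '``(' or not buf:
--             if buf:
--                 out.append(''.join(buf))
--             buf = [c]
--         else:
--             buf.append(c)
--     out.append(''.join(buf))
--     return out
-- ===== Notes on version B (the rewrite author's own statement) =====
-- stated objective: faster
-- what changed: A cleans each line by recursive 4-char slicing (copying the tail at every step) and grows sentences with repeated condensed[-1] += string concatenation; B makes one indexed pass over the 4-aligned chunks of each line, skips all-space chunks, and collects each sentence's pieces in a buffer joined once.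
import Mathlib
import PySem

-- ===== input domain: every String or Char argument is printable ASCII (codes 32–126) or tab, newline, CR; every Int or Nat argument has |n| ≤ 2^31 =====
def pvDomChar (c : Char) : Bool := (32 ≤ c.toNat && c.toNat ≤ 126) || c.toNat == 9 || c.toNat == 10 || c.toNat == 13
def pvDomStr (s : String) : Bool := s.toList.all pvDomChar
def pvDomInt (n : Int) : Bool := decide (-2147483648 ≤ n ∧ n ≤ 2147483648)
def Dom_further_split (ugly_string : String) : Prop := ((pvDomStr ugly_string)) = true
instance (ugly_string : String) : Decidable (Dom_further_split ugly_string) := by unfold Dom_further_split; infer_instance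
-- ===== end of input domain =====

-- B replaces A's recursive per-slice cleaning and repeated `condensed[-1] +=` with a single
-- indexed pass over 4-aligned chunks and a buffer joined once per sentence (objective: faster).

-- ===== PORT A =====
def pvSpaces4 : List Char := [' ', ' ', ' ', ' ']

-- clear_leading_white_tab; string[:4] / string[4:] = take 4 / drop 4 (exact: nonnegative slices)
def pvClearTab : List Char → List Char
  | [] => []
  | c :: rest =>
      if (c :: rest).take 4 = pvSpaces4 then pvClearTab ((c :: rest).drop 4)
      else (c :: rest).take 4 ++ pvClearTab ((c :: rest).drop 4)
termination_by s => s.length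
decreasing_by all_goals simp

-- p = cleaned[i][0] == '(' and cleaned[i][2] == ')'  (c[0]/c[2] raise outside Pre_; pyGet? = none there)
-- or cleaned[i][:3] == '``('
def pvStartA (c : List Char) : Bool :=
  (PySem.List.pyGet? c 0 == some '(' && PySem.List.pyGet? c 2 == some ')') || c.take 3 == ['`', '`', '(']

-- the body of A's `for i in range(len(cleaned))` loop acting on the accumulator `condensed`
def pvMergeStepA (condensed : List (List Char)) (c : List Char) : List (List Char) :=
  if pvStartA c then condensed ++ [c]
  else if condensed = [] then condensed ++ [c]
  else condensed.dropLast ++ [condensed.getLast! ++ c]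

def further_split (ugly_string : String) : List String :=
  (((PySem.Chars.splitOn ugly_string.toList ['\n']).map pvClearTab).foldl pvMergeStepA []).map String.ofList

-- ===== PORT B =====
-- B's `while i < n` chunk loop; line[i:i+4] for 0 ≤ i < n = (s.drop i).take 4 (exact: nonnegative in-range slice)
def pvChunksB (s : List Char) (i : Nat) : List (List Char) :=
  if i < s.length then
    (if (s.drop i).take 4 = pvSpaces4 then pvChunksB s (i + 4)
     else ((s.drop i).take 4) :: pvChunksB s (i + 4))
  else []
termination_by s.length - i
decreasing_by all_goals omega

-- c = ''.join(parts)
def pvCleanB (s : List Char) : List Char := (pvChunksB s 0).flatten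

def pvStartB (c : List Char) : Bool :=
  (PySem.List.pyGet? c 0 == some '(' && PySem.List.pyGet? c 2 == some ')') || c.take 3 == ['`', '`', '(']

-- B's main loop over the lines: out/buf accumulators, final out.append(''.join(buf))
def pvMergeB : List (List Char) → List (List Char) → List (List Char) → List (List Char)
  | [], buf, out => out ++ [buf.flatten]
  | l :: rest, buf, out =>
      if pvStartB (pvCleanB l) || buf.isEmpty then
        pvMergeB rest [pvCleanB l] (if buf.isEmpty then out else out ++ [buf.flatten])
      else pvMergeB rest (buf ++ [pvCleanB l]) out

def further_split_alt (ugly_string : String) : List String :=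
  (pvMergeB (PySem.Chars.splitOn ugly_string.toList ['\n']) [] []).map String.ofList

-- ===== PRECONDITION & SPEC =====
-- Pre_ excludes exactly the inputs on which the Python A raises IndexError: a line whose cleaned
-- form is empty (a line of spaces with length divisible by 4, e.g. a blank line) — cleaned[i][0]
-- raises — or whose cleaned form is a 1- or 2-char string starting with '(' — cleaned[i][2] raises.
def pvLineOK (l : List Char) : Bool :=
  !(l.length % 4 == 0 && l.all (· == ' ')) &&
  !((l.length % 4 == 1 || l.length % 4 == 2) &&
    (l.take (l.length - l.length % 4)).all (· == ' ') &&
    ((l.drop (l.length - l.length % 4)).head? == some '('))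

def Pre_further_split (ugly_string : String) : Prop :=
  ∀ l ∈ PySem.Chars.splitOn ugly_string.toList ['\n'], pvLineOK l = true

instance (ugly_string : String) : Decidable (Pre_further_split ugly_string) := by
  unfold Pre_further_split; infer_instance

def pvWitness_further_split : String := "(a) one\n    two"

def Spec_further_split (ugly_string : String) (out : List String) : Prop := out = further_split_alt ugly_string
instance (ugly_string : String) (out : List String) : Decidable (Spec_further_split ugly_string out) := by unfold Spec_further_split; infer_instance

-- ===== CLAIM (what is proved, stated in full; the proofs are below) =====
def Claim_equal_further_split : Prop := ∀ (ugly_string : String), Dom_further_split ugly_string → Pre_further_split ugly_string → Spec_further_split ugly_string (further_split ugly_string)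

-- ===== LEMMAS AND PROOFS =====

-- proof-side recursive chunking of a line into its 4-aligned blocks
def pvChunksRec : List Char → List (List Char)
  | [] => []
  | c :: rest =>
      if (c :: rest).take 4 = pvSpaces4 then pvChunksRec ((c :: rest).drop 4)
      else ((c :: rest).take 4) :: pvChunksRec ((c :: rest).drop 4)
termination_by s => s.length
decreasing_by all_goals simp

theorem pvClearTab_eq_flatten (s : List Char) : pvClearTab s = (pvChunksRec s).flatten := by
  fun_induction pvClearTab s with
  | case1 => simp [pvChunksRec]
  | case2 c rest h ih =>
      rw [pvChunksRec, if_pos h]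
      simpa using ih
  | case3 c rest h ih =>
      rw [pvChunksRec, if_neg h]
      simp
      simpa using ih

theorem pvChunksB_eq_rec (s : List Char) (i : Nat) : pvChunksB s i = pvChunksRec (s.drop i) := by
  fun_induction pvChunksB s i with
  | case1 i h h4 ih =>
      rw [ih]
      cases hd : s.drop i with
      | nil => rw [hd] at h4; simp [pvSpaces4] at h4
      | cons c rest =>
          rw [pvChunksRec]
          have hdd : s.drop (i + 4) = (s.drop i).drop 4 := by
            rw [List.drop_drop]
          rw [hdd, hd, if_pos (by rw [← hd]; exact h4)]
  | case2 i h h4 ih =>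
      rw [ih]
      cases hd : s.drop i with
      | nil =>
          exfalso
          have : s.length - i = 0 := by
            have := congrArg List.length hd; simpa using this
          omega
      | cons c rest =>
          rw [pvChunksRec]
          have hdd : s.drop (i + 4) = (s.drop i).drop 4 := by
            rw [List.drop_drop]
          rw [hdd, hd, if_neg (by rw [← hd]; exact h4), ← hd]
  | case3 i h =>
      have : s.drop i = [] := by
        apply List.drop_eq_nil_of_le; omega
      simp [this, pvChunksRec]

theorem pvCleanB_eq_clearTab (l : List Char) : pvCleanB l = pvClearTab l := by
  rw [pvCleanB, pvChunksB_eq_rec, pvClearTab_eq_flatten]; rfl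

theorem pvStart_eq (c : List Char) : pvStartB c = pvStartA c := rfl

-- the loop invariant: B's state (out, buf), buf nonempty, corresponds to A's accumulator out ++ [buf.flatten]
theorem pvMerge_inv (lines : List (List Char)) :
    ∀ buf out : List (List Char), buf ≠ [] →
      pvMergeB lines buf out = (lines.map pvClearTab).foldl pvMergeStepA (out ++ [buf.flatten]) := by
  induction lines with
  | nil => intro buf out _; simp [pvMergeB]
  | cons l rest ih =>
      intro buf out hbuf
      have hbe : buf.isEmpty = false := by simpa [List.isEmpty_iff] using hbuf
      rw [pvMergeB]
      simp only [List.map_cons, List.foldl_cons]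
      by_cases hs : pvStartB (pvCleanB l) = true
      · have hstep : pvMergeStepA (out ++ [buf.flatten]) (pvClearTab l)
            = (out ++ [buf.flatten]) ++ [pvClearTab l] := by
          unfold pvMergeStepA
          rw [← pvStart_eq, ← pvCleanB_eq_clearTab, hs]; simp
        rw [hstep]
        simp only [hs, hbe, Bool.true_or, if_true]
        rw [if_neg (by simp), ih [pvCleanB l] _ (by simp)]
        simp [pvCleanB_eq_clearTab]
      · have hs' : pvStartB (pvCleanB l) = false := by simpa using hs
        have hne : out ++ [buf.flatten] ≠ [] := by simp
        have hstep : pvMergeStepA (out ++ [buf.flatten]) (pvClearTab l)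
            = out ++ [(buf ++ [pvCleanB l]).flatten] := by
          unfold pvMergeStepA
          rw [← pvStart_eq, ← pvCleanB_eq_clearTab, hs']
          simp [hne, List.getLast!_eq_getLast?_getD, pvCleanB_eq_clearTab]
        rw [hstep, if_neg (by simp [hs', hbe])]
        exact ih (buf ++ [pvCleanB l]) out (by simp)

theorem pv_go_ne_nil (sep : List Char) (fuel : Nat) :
    ∀ l cur acc, PySem.Chars.splitOn.go sep fuel l cur acc ≠ [] := by
  induction fuel with
  | zero => intro l cur acc; simp [PySem.Chars.splitOn.go]
  | succ n ih =>
      intro l cur acc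
      cases l with
      | nil => simp [PySem.Chars.splitOn.go]
      | cons c rest =>
          rw [PySem.Chars.splitOn.go]
          split
          · exact ih _ _ _
          · exact ih _ _ _

theorem pv_splitOn_ne_nil (s sep : List Char) : PySem.Chars.splitOn s sep ≠ [] :=
  pv_go_ne_nil sep _ s [] []

theorem pv_stepA_nil (c : List Char) : pvMergeStepA [] c = [c] := by
  unfold pvMergeStepA; split_ifs <;> simp_all

-- ===== VERDICT (by name: the statement is the Claim_ definition above) =====
theorem further_split_spec : Claim_equal_further_split := by
  intro s _ _
  unfold Spec_further_split
  simp only [further_split, further_split_alt]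
  cases hl : PySem.Chars.splitOn s.toList ['\n'] with
  | nil => exact absurd hl (pv_splitOn_ne_nil _ _)
  | cons l rest =>
      rw [pvMergeB]
      rw [if_pos (by simp), if_pos (by simp)]
      rw [pvMerge_inv rest [pvCleanB l] [] (by simp)]
      simp only [List.map_cons, List.foldl_cons, pv_stepA_nil]
      simp [pvCleanB_eq_clearTab]
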